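-- pv_equiv track=rewrite | github.com/William-Carter/tetis | board.py | generateWalls
-- ===== SOURCE A (Python) =====
-- def generateWalls(gridDimensions):
--     walls = []
--     cursorX = 0
--     cursorY = 0
--     for row in range(gridDimensions[1]):
--         for column in range(gridDimensions[0]):
--             if row == 0 or row == gridDimensions[1]-1:
--                 walls.append((cursorX, cursorY))
--             else:
--                 if column == 0 or column == gridDimensions[0]-1:
--                     walls.append((cursorX, cursorY))
--
--             cursorX += 1
--         cursorX = 0
--         cursorY += 1
--
--     return walls
-- ===== SOURCE B (Python) =====
-- def generateWalls(gridDimensions):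
--     w, h = gridDimensions
--     if h <= 0 or w <= 0:
--         return []
--     walls = [(x, 0) for x in range(w)]
--     for y in range(1, h - 1):
--         walls.append((0, y))
--         if w > 1:
--             walls.append((w - 1, y))
--     if h > 1:
--         walls += [(x, h - 1) for x in range(w)]
--     return walls
-- ===== Notes on version B (the rewrite author's own statement) =====
-- stated objective: faster
-- what changed: B emits the perimeter directly (full top row, the two side cells of each middle row, full bottom row) instead of scanning every cell of the W x H grid and testing whether it lies on the border.
import Mathlib
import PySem

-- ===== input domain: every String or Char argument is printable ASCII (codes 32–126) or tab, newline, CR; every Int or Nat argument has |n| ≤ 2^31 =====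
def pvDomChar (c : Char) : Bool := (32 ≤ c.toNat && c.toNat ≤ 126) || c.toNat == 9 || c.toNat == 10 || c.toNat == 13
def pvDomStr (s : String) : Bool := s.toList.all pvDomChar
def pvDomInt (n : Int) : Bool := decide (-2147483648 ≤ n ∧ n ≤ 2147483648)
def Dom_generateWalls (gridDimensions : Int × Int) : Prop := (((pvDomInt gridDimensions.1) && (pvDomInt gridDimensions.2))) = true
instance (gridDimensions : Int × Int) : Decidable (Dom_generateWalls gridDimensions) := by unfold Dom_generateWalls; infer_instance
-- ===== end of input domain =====

-- B emits the perimeter directly (top row, side cells of middle rows, bottom row) in O(W+H)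
-- instead of A's O(W*H) scan of every grid cell; return values are identical.

-- ===== PORT A =====
-- literal port of A: nested loops over rows/columns with state (walls, cursorX, cursorY)
def generateWalls (gridDimensions : Int × Int) : List (Int × Int) :=
  let init : List (Int × Int) × Int × Int := ([], 0, 0)
  let res := (PySem.List.pyRange 0 gridDimensions.2 1).foldl
    (fun (st : List (Int × Int) × Int × Int) row =>
      let inner := (PySem.List.pyRange 0 gridDimensions.1 1).foldl
        (fun (st2 : List (Int × Int) × Int) column =>
          let walls :=
            if row = 0 ∨ row = gridDimensions.2 - 1 then st2.1 ++ [(st2.2, st.2.2)]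
            else if column = 0 ∨ column = gridDimensions.1 - 1 then st2.1 ++ [(st2.2, st.2.2)]
            else st2.1
          (walls, st2.2 + 1))
        (st.1, st.2.1)
      (inner.1, 0, st.2.2 + 1))
    init
  res.1

-- ===== PORT B =====
def generateWalls_alt (gridDimensions : Int × Int) : List (Int × Int) :=
  let w := gridDimensions.1
  let h := gridDimensions.2
  if h ≤ 0 ∨ w ≤ 0 then []
  else
    let walls := (PySem.List.pyRange 0 w 1).map (fun x => (x, (0 : Int)))
    let walls := (PySem.List.pyRange 1 (h - 1) 1).foldl
      (fun acc y =>
        let acc := acc ++ [((0 : Int), y)]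
        if 1 < w then acc ++ [(w - 1, y)] else acc)
      walls
    if 1 < h then walls ++ (PySem.List.pyRange 0 w 1).map (fun x => (x, h - 1)) else walls

-- ===== PRECONDITION & SPEC =====
def Spec_generateWalls (gridDimensions : Int × Int) (out : List (Int × Int)) : Prop := out = generateWalls_alt gridDimensions
instance (gridDimensions : Int × Int) (out : List (Int × Int)) : Decidable (Spec_generateWalls gridDimensions out) := by unfold Spec_generateWalls; infer_instance

-- ===== CLAIM (what is proved, stated in full; the proofs are below) =====
def Claim_equal_generateWalls : Prop := ∀ (gridDimensions : Int × Int), Dom_generateWalls gridDimensions → Spec_generateWalls gridDimensions (generateWalls gridDimensions)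

-- ===== LEMMAS AND PROOFS =====

-- common reference value: for each row, either the full row or its border cells
def pvRow (w row : Int) (full : Bool) : List (Int × Int) :=
  if full then (PySem.List.pyRange 0 w 1).map (fun x => (x, row))
  else ((PySem.List.pyRange 0 w 1).filter (fun x => decide (x = 0 ∨ x = w - 1))).map (fun x => (x, row))

def pvSpec (w h : Int) : List (Int × Int) :=
  (PySem.List.pyRange 0 h 1).flatMap (fun row => pvRow w row (decide (row = 0 ∨ row = h - 1)))

-- A's inner loop: the running cursorX equals the current column, so the loop appends
-- exactly the filtered columns paired with the fixed cursorY.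
theorem pv_inner (w y : Int) (P : Int → Bool) :
    ∀ (n : Nat) (a : Int) (walls : List (Int × Int)), (w - a).toNat = n →
    ((PySem.List.pyRange a w 1).foldl
      (fun (st2 : List (Int × Int) × Int) column =>
        ((if P column then st2.1 ++ [(st2.2, y)] else st2.1), st2.2 + 1)) (walls, a))
    = (walls ++ ((PySem.List.pyRange a w 1).filter P).map (fun c => (c, y)), max a w) := by
  intro n
  induction n with
  | zero =>
    intro a walls hn
    have hwa : w ≤ a := by omega
    rw [PySem.List.pyRange_one_eq_nil hwa]
    simp [max_eq_left hwa]
  | succ m ih =>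
    intro a walls hn
    have haw : a < w := by omega
    rw [PySem.List.pyRange_one_cons haw]
    simp only [List.foldl_cons, List.filter_cons]
    have h2 : (w - (a + 1)).toNat = m := by omega
    by_cases hp : P a = true
    · rw [if_pos hp, if_pos hp, ih (a+1) (walls ++ [(a, y)]) h2]
      simp [max_eq_right (by omega : a ≤ w), max_eq_right (by omega : a + 1 ≤ w)]
    · rw [if_neg hp, if_neg hp, ih (a+1) walls h2]
      simp [max_eq_right (by omega : a ≤ w), max_eq_right (by omega : a + 1 ≤ w)]

-- A's outer loop: the running cursorY equals the current row.
theorem pv_outer (w h : Int) :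
    ∀ (n : Nat) (r : Int) (walls : List (Int × Int)), (h - r).toNat = n →
    ((PySem.List.pyRange r h 1).foldl
      (fun (st : List (Int × Int) × Int × Int) row =>
        let inner := (PySem.List.pyRange 0 w 1).foldl
          (fun (st2 : List (Int × Int) × Int) column =>
            let walls :=
              if row = 0 ∨ row = h - 1 then st2.1 ++ [(st2.2, st.2.2)]
              else if column = 0 ∨ column = w - 1 then st2.1 ++ [(st2.2, st.2.2)]
              else st2.1
            (walls, st2.2 + 1))
          (st.1, st.2.1)
        (inner.1, 0, st.2.2 + 1)) (walls, 0, r)).1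
    = walls ++ (PySem.List.pyRange r h 1).flatMap
        (fun row => pvRow w row (decide (row = 0 ∨ row = h - 1))) := by
  intro n
  induction n with
  | zero =>
    intro r walls hn
    have hhr : h ≤ r := by omega
    rw [PySem.List.pyRange_one_eq_nil hhr]
    simp
  | succ m ih =>
    intro r walls hn
    have hrh : r < h := by omega
    rw [PySem.List.pyRange_one_cons hrh]
    simp only [List.foldl_cons, List.flatMap_cons]
    have hstep :
        ((PySem.List.pyRange 0 w 1).foldl
          (fun (st2 : List (Int × Int) × Int) column =>
            ((if r = 0 ∨ r = h - 1 then st2.1 ++ [(st2.2, r)]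
              else if column = 0 ∨ column = w - 1 then st2.1 ++ [(st2.2, r)]
              else st2.1), st2.2 + 1)) (walls, 0))
        = (walls ++ ((PySem.List.pyRange 0 w 1).filter
              (fun c => decide (r = 0 ∨ r = h - 1) || decide (c = 0 ∨ c = w - 1))).map
              (fun c => (c, r)), max 0 w) := by
      have hfeq : (fun (st2 : List (Int × Int) × Int) column =>
            ((if r = 0 ∨ r = h - 1 then st2.1 ++ [(st2.2, r)]
              else if column = 0 ∨ column = w - 1 then st2.1 ++ [(st2.2, r)]
              else st2.1), st2.2 + 1))
          = (fun (st2 : List (Int × Int) × Int) column =>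
            ((if (decide (r = 0 ∨ r = h - 1) || decide (column = 0 ∨ column = w - 1)) = true
              then st2.1 ++ [(st2.2, r)] else st2.1), st2.2 + 1)) := by
        funext st2 column
        by_cases h1 : r = 0 ∨ r = h - 1 <;> by_cases h2 : column = 0 ∨ column = w - 1 <;>
          simp [h1, h2]
      rw [hfeq]
      exact pv_inner w r (fun c => decide (r = 0 ∨ r = h - 1) || decide (c = 0 ∨ c = w - 1))
        (w - 0).toNat 0 walls rfl
    rw [hstep, ih (r + 1) _ (by omega)]
    have hrow : ((PySem.List.pyRange 0 w 1).filter
          (fun c => decide (r = 0 ∨ r = h - 1) || decide (c = 0 ∨ c = w - 1))).map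
          (fun c => (c, r)) = pvRow w r (decide (r = 0 ∨ r = h - 1)) := by
      unfold pvRow
      by_cases h1 : r = 0 ∨ r = h - 1
      · simp [h1, List.filter_true]
      · simp [h1]
    rw [hrow, List.append_assoc]

theorem pv_A_eq_spec (gd : Int × Int) : generateWalls gd = pvSpec gd.1 gd.2 := by
  unfold generateWalls pvSpec
  exact pv_outer gd.1 gd.2 (gd.2 - 0).toNat 0 [] rfl

-- border cells of one row, closed form (for 0 < w)
theorem pv_filter_border (w : Int) (hw : 0 < w) :
    (PySem.List.pyRange 0 w 1).filter (fun x => decide (x = 0 ∨ x = w - 1))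
    = 0 :: (if 1 < w then [w - 1] else []) := by
  rw [PySem.List.pyRange_one_cons hw, List.filter_cons,
      if_pos (by simp : (decide ((0:Int) = 0 ∨ (0:Int) = w - 1)) = true)]
  simp only [zero_add]
  by_cases hw1 : 1 < w
  · have hsplit : PySem.List.pyRange 1 w 1 = PySem.List.pyRange 1 (w-1) 1 ++ [w-1] := by
      have := PySem.List.pyRange_one_succ_right (a := 1) (b := w - 1) (by omega)
      simpa [sub_add_cancel] using this
    rw [hsplit, List.filter_append]
    have hnil : (PySem.List.pyRange 1 (w-1) 1).filter (fun x => decide (x = 0 ∨ x = w - 1)) = [] := by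
      apply List.filter_eq_nil_iff.mpr
      intro x hx
      have := PySem.List.mem_pyRange_one.mp hx
      simp only [decide_eq_true_eq]
      omega
    rw [hnil]
    simp [hw1, show w - 1 ≠ 0 by omega]
  · have hw1' : w = 1 := by omega
    subst hw1'
    simp [PySem.List.pyRange_one_eq_nil (by omega : (1:Int) ≤ 1)]

theorem pv_B_eq_spec (gd : Int × Int) : generateWalls_alt gd = pvSpec gd.1 gd.2 := by
  obtain ⟨w, h⟩ := gd
  unfold generateWalls_alt pvSpec
  simp only
  by_cases hdeg : h ≤ 0 ∨ w ≤ 0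
  · rw [if_pos hdeg]
    symm
    rcases hdeg with hh | hw
    · rw [PySem.List.pyRange_one_eq_nil (by omega : h ≤ 0), List.flatMap_nil]
    · apply List.flatMap_eq_nil_iff.mpr
      intro row _
      unfold pvRow
      rw [PySem.List.pyRange_one_eq_nil (by omega : w ≤ 0)]
      split <;> simp
  · rw [if_neg hdeg]
    have hh : 0 < h := by omega
    have hw : 0 < w := by omega
    -- B's middle loop appends per row the border cells of that row
    have hmid : ∀ (acc : List (Int × Int)),
        (PySem.List.pyRange 1 (h - 1) 1).foldl
          (fun acc y =>
            (if 1 < w then (acc ++ [((0 : Int), y)]) ++ [(w - 1, y)] else acc ++ [((0 : Int), y)]))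
          acc
        = acc ++ (PySem.List.pyRange 1 (h - 1) 1).flatMap
            (fun y => ((0 : Int), y) :: (if 1 < w then [(w - 1, y)] else [])) := by
      intro acc
      have hfeq : (fun (acc : List (Int × Int)) (y : Int) =>
            (if 1 < w then (acc ++ [((0 : Int), y)]) ++ [(w - 1, y)] else acc ++ [((0 : Int), y)]))
          = (fun acc y => acc ++ (((0 : Int), y) :: (if 1 < w then [(w - 1, y)] else []))) := by
        funext acc y
        by_cases h1 : 1 < w <;> simp [h1]
      rw [hfeq, PySem.List.foldl_append_eq_flatMap]
    -- spec split: row 0, middle rows, row h-1 (when h > 1)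
    by_cases hh1 : 1 < h
    · rw [if_pos hh1]
      have hsplit1 : PySem.List.pyRange 0 h 1 = 0 :: PySem.List.pyRange 1 h 1 :=
        PySem.List.pyRange_one_cons hh
      have hsplit2 : PySem.List.pyRange 1 h 1 = PySem.List.pyRange 1 (h-1) 1 ++ [h-1] := by
        have := PySem.List.pyRange_one_succ_right (a := 1) (b := h - 1) (by omega)
        simpa [sub_add_cancel] using this
      rw [hsplit1, hsplit2, List.flatMap_cons, List.flatMap_append, List.flatMap_cons,
        List.flatMap_nil, List.append_nil]
      have hrow0 : pvRow w 0 (decide ((0:Int) = 0 ∨ (0:Int) = h - 1)) =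
          (PySem.List.pyRange 0 w 1).map (fun x => (x, (0:Int))) := by
        unfold pvRow; simp
      have hrowlast : pvRow w (h-1) (decide (h - 1 = 0 ∨ h - 1 = h - 1)) =
          (PySem.List.pyRange 0 w 1).map (fun x => (x, h - 1)) := by
        unfold pvRow; simp
      have hrowmid : (PySem.List.pyRange 1 (h-1) 1).flatMap
            (fun row => pvRow w row (decide (row = 0 ∨ row = h - 1)))
          = (PySem.List.pyRange 1 (h-1) 1).flatMap
            (fun y => ((0 : Int), y) :: (if 1 < w then [(w - 1, y)] else [])) := by
        rw [List.flatMap_def, List.flatMap_def]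
        congr 1
        apply List.map_congr_left
        intro y hy
        have hy' := PySem.List.mem_pyRange_one.mp hy
        unfold pvRow
        rw [pv_filter_border w hw]
        have : (decide (y = 0 ∨ y = h - 1)) = false := by
          simp only [decide_eq_false_iff_not]; omega
        rw [this]
        by_cases h1 : 1 < w <;> simp [h1]
      rw [hmid, hrow0, hrowlast, hrowmid, List.append_assoc]
    · -- h = 1: single full row
      have hh' : h = 1 := by omega
      subst hh'
      rw [if_neg hh1, hmid,
          PySem.List.pyRange_one_eq_nil (by omega : (1:Int) - 1 ≤ 1), List.flatMap_nil,
          List.append_nil,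
          PySem.List.pyRange_one_cons (by omega : (0:Int) < 1)]
      simp only [zero_add]
      rw [PySem.List.pyRange_one_eq_nil (by omega : (1:Int) ≤ 1), List.flatMap_cons,
          List.flatMap_nil, List.append_nil]
      unfold pvRow
      simp

-- ===== VERDICT (by name: the statement is the Claim_ definition above) =====
theorem generateWalls_spec : Claim_equal_generateWalls := by
  intro gd _
  unfold Spec_generateWalls
  rw [pv_A_eq_spec, pv_B_eq_spec]
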